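-- pv_equiv track=rewrite | github.com/Jeongseup/computer-science-study | data-structure-and-alogorithm/coding-test/baekjoon/array/problem_8958.py | solution
-- ===== SOURCE A (Python) =====
-- def solution(input_string: str) -> int:
-- 	score = 0
-- 	stack = []
--
-- 	for word in input_string:
-- 		if word == 'O':
-- 			stack.append(word)
-- 			score += len(stack)
-- 		else:  # word is 'X'
-- 			stack = []
--
-- 	return score
-- ===== SOURCE B (Python) =====
-- def solution(input_string: str) -> int:
--     total = 0
--     i = 0
--     n = len(input_string)
--     while i < n:
--         if input_string[i] != 'O':
--             i += 1
--         else: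
--             j = i + 1
--             while j < n and input_string[j] == 'O':
--                 j += 1
--             L = j - i
--             total += L * (L + 1) // 2
--             i = j
--     return total
-- ===== Notes on version B (the rewrite author's own statement) =====
-- stated objective: alternative
-- what changed: Per-character streak accumulation with an explicit stack is replaced by a two-pointer scan over maximal 'O'-runs, adding the closed-form triangular number L*(L+1)//2 per run.
import Mathlib
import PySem

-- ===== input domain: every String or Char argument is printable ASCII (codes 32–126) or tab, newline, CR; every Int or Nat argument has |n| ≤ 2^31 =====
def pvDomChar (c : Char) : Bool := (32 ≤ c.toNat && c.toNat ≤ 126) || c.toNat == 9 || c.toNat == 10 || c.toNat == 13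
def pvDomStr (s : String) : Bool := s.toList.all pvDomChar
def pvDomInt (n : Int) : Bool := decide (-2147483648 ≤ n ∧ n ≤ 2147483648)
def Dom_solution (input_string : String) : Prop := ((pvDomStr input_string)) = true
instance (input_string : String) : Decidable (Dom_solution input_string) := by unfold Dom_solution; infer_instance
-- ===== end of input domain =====

-- B replaces the per-character streak/stack accumulation by a two-pointer scan over maximal 'O'-runs with a closed-form triangular sum per run (alternative structure, same cost).

-- ===== PORT A =====
-- for word in input_string: if 'O' then stack.append(word); score += len(stack) else stack = []
def solution (input_string : String) : Int :=
  (input_string.toList.foldl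
    (fun st c =>
      if c = 'O' then
        let stack := st.2 ++ [c]
        (st.1 + (stack.length : Int), stack)
      else (st.1, ([] : List Char)))
    ((0 : Int), ([] : List Char))).1

-- ===== PORT B =====
-- inner while: j advances past the run of 'O's starting after position i
def runLenB : List Char → Nat
  | [] => 0
  | c :: cs => if c = 'O' then runLenB cs + 1 else 0

-- L * (L + 1) // 2
def triB (L : Int) : Int := PySem.Int.floordiv (L * (L + 1)) 2

-- outer while over the string, consuming one char or one whole run per step
def altGoB : List Char → Int
  | [] => 0
  | c :: cs =>
    if c ≠ 'O' then altGoB cs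
    else
      let L : Int := ((1 + runLenB cs : Nat) : Int)
      triB L + altGoB (cs.drop (runLenB cs))
termination_by cs => cs.length
decreasing_by
  all_goals simp only [List.length_cons, List.length_drop]; omega

def solution_alt (input_string : String) : Int := altGoB input_string.toList

-- ===== PRECONDITION & SPEC =====
def Spec_solution (input_string : String) (out : Int) : Prop := out = solution_alt input_string
instance (input_string : String) (out : Int) : Decidable (Spec_solution input_string out) := by unfold Spec_solution; infer_instance

-- ===== CLAIM (what is proved, stated in full; the proofs are below) =====
def Claim_equal_solution : Prop := ∀ (input_string : String), Dom_solution input_string → Spec_solution input_string (solution input_string)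

-- ===== LEMMAS AND PROOFS =====

theorem triB_natCast (k : Nat) : triB (k : Int) = ((k * (k + 1) / 2 : Nat) : Int) := by
  unfold triB
  have h : ((k : Int) * ((k : Int) + 1)) = ((k * (k + 1) : Nat) : Int) := by push_cast; ring
  rw [h]
  exact_mod_cast PySem.Int.floordiv_natCast (k * (k + 1)) 2

theorem triB_zero : triB 0 = 0 := by
  have := triB_natCast 0
  simpa using this

theorem triB_succ (k : Nat) : triB (((k + 1 : Nat)) : Int) = triB (k : Int) + (k + 1) := by
  rw [triB_natCast, triB_natCast]
  have h3 : (k + 1) * (k + 1 + 1) / 2 = k * (k + 1) / 2 + (k + 1) := by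
    have h2 : (k + 1) * (k + 1 + 1) = k * (k + 1) + 2 * (k + 1) := by ring
    omega
  rw [h3]; push_cast; ring

theorem altGoB_cons_O (cs : List Char) :
    altGoB ('O' :: cs) = triB ((1 + runLenB cs : Nat) : Int) + altGoB (cs.drop (runLenB cs)) := by
  rw [altGoB]; simp

theorem altGoB_cons_not {c : Char} (cs : List Char) (hc : c ≠ 'O') :
    altGoB (c :: cs) = altGoB cs := by
  rw [altGoB]; simp [hc]

theorem altGoB_run (cs : List Char) :
    altGoB cs = triB ((runLenB cs : Nat) : Int) + altGoB (cs.drop (runLenB cs)) := by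
  cases cs with
  | nil => simp [altGoB, runLenB, triB_zero]
  | cons c cs =>
    by_cases hc : c = 'O'
    · subst hc
      rw [altGoB_cons_O]
      have hr : runLenB ('O' :: cs) = runLenB cs + 1 := by simp [runLenB]
      rw [hr, Nat.add_comm 1 (runLenB cs), List.drop_succ_cons]
    · have hr : runLenB (c :: cs) = 0 := by simp [runLenB, hc]
      rw [hr]
      simp only [Nat.cast_zero, triB_zero, List.drop_zero, zero_add]

theorem fold_main (cs : List Char) (score : Int) (stack : List Char) :
    (cs.foldl
      (fun st c =>
        if c = 'O' then
          let stk := st.2 ++ [c]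
          (st.1 + (stk.length : Int), stk)
        else (st.1, ([] : List Char)))
      (score, stack)).1
    = score + triB ((stack.length + runLenB cs : Nat) : Int) - triB ((stack.length : Nat) : Int)
        + altGoB (cs.drop (runLenB cs)) := by
  induction cs generalizing score stack with
  | nil =>
    simp [runLenB, altGoB]
  | cons c cs ih =>
    by_cases hc : c = 'O'
    · subst hc
      have hstep : (('O' :: cs).foldl
          (fun st c =>
            if c = 'O' then
              let stk := st.2 ++ [c]
              (st.1 + (stk.length : Int), stk)
            else (st.1, ([] : List Char)))
          (score, stack))
        = (cs.foldl
          (fun st c =>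
            if c = 'O' then
              let stk := st.2 ++ [c]
              (st.1 + (stk.length : Int), stk)
            else (st.1, ([] : List Char)))
          (score + ((stack.length + 1 : Nat) : Int), stack ++ ['O'])) := by
        simp
      rw [hstep, ih]
      have hr : runLenB ('O' :: cs) = runLenB cs + 1 := by simp [runLenB]
      rw [hr, List.drop_succ_cons]
      simp only [List.length_append, List.length_cons, List.length_nil, Nat.zero_add]
      have h1 : stack.length + (runLenB cs + 1) = stack.length + 1 + runLenB cs := by omega
      rw [h1, triB_succ stack.length]
      push_cast
      ring
    · have hstep : ((c :: cs).foldl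
          (fun st c =>
            if c = 'O' then
              let stk := st.2 ++ [c]
              (st.1 + (stk.length : Int), stk)
            else (st.1, ([] : List Char)))
          (score, stack))
        = (cs.foldl
          (fun st c =>
            if c = 'O' then
              let stk := st.2 ++ [c]
              (st.1 + (stk.length : Int), stk)
            else (st.1, ([] : List Char)))
          (score, ([] : List Char))) := by
        simp [hc]
      rw [hstep, ih]
      have hr : runLenB (c :: cs) = 0 := by simp [runLenB, hc]
      rw [hr]
      simp only [List.length_nil, List.drop_zero, Nat.zero_add]
      rw [altGoB_cons_not cs hc, altGoB_run cs]
      simp [triB_zero]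
      ring

-- ===== VERDICT (by name: the statement is the Claim_ definition above) =====
theorem solution_spec : Claim_equal_solution := by
  intro s _
  unfold Spec_solution solution solution_alt
  rw [fold_main]
  simp only [List.length_nil, Nat.zero_add, Nat.cast_zero, triB_zero]
  rw [altGoB_run s.toList]
  ring
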